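-- pv_equiv track=rewrite | github.com/tanmay-delhikar/satellite-image-analysis-ml | wsf-test.py | band_sorter_S2
-- ===== SOURCE A (Python) =====
-- def band_sorter_S2(list_temp):
--     sorted_list = []
--     for element in list_temp:
--         if element.endswith('_B01.tif'):
--             sorted_list.append(element)
--     for element in list_temp:
--         if element.endswith('_B02.tif'):
--             sorted_list.append(element)
--     for element in list_temp:
--         if element.endswith('_B03.tif'):
--             sorted_list.append(element)
--     for element in list_temp:
--         if element.endswith('_B04.tif'):
--             sorted_list.append(element)
--     for element in list_temp:
--         if element.endswith('_B05.tif'):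
--             sorted_list.append(element)
--     for element in list_temp:
--         if element.endswith('_B06.tif'):
--             sorted_list.append(element)
--     for element in list_temp:
--         if element.endswith('_B07.tif'):
--             sorted_list.append(element)
--     for element in list_temp:
--         if element.endswith('_B08.tif'):
--             sorted_list.append(element)
--     for element in list_temp:
--         if element.endswith('_B09.tif'):
--             sorted_list.append(element)
--     for element in list_temp:
--         if element.endswith('_B10.tif'):
--             sorted_list.append(element)
--     for element in list_temp:
--         if element.endswith('_B11.tif'):
--             sorted_list.append(element)
--     for element in list_temp:
--         if element.endswith('_B12.tif'):
--             sorted_list.append(element)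
--     for element in list_temp:
--         if element.endswith('_B8A.tif'):
--             sorted_list.append(element)
--     return sorted_list
-- ===== SOURCE B (Python) =====
-- _BANDS = ['_B01.tif', '_B02.tif', '_B03.tif', '_B04.tif', '_B05.tif',
--           '_B06.tif', '_B07.tif', '_B08.tif', '_B09.tif', '_B10.tif',
--           '_B11.tif', '_B12.tif', '_B8A.tif']
--
--
-- def band_sorter_S2(list_temp):
--     # One pass: group elements by their last 8 characters, then emit the
--     # 13 band buckets in band order (all suffixes have length 8).
--     buckets = {}
--     for element in list_temp:
--         buckets.setdefault(element[-8:], []).append(element)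
--     out = []
--     for band in _BANDS:
--         out += buckets.get(band, [])
--     return out
-- ===== Notes on version B (the rewrite author's own statement) =====
-- stated objective: faster
-- what changed: Replaces A's 13 separate endswith-filter passes over the list with a single grouping pass that buckets each element by its last-8-character suffix in a dict, then concatenates the 13 band buckets in band order.
import Mathlib
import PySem

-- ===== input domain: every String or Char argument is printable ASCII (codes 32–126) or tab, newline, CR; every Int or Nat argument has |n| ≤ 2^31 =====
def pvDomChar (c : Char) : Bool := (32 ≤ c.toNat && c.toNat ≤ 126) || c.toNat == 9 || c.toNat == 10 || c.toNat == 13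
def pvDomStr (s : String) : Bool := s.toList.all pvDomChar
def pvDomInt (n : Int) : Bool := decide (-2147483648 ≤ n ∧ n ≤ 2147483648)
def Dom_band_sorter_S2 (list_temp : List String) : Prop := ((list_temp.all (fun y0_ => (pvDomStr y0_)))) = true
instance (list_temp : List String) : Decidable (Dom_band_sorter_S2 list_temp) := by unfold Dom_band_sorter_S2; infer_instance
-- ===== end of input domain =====

-- B replaces A's 13 scans of the input by one grouping pass over it (bucket by the
-- 8-character band suffix) followed by emitting the 13 buckets in band order.

-- ===== PORT A =====
-- literal transliteration: 13 successive filtering loops appending to sorted_list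
def band_sorter_S2 (list_temp : List String) : List String :=
  let s1 := list_temp.foldl (fun acc e => if PySem.Str.endswith e "_B01.tif" then acc ++ [e] else acc) []
  let s2 := list_temp.foldl (fun acc e => if PySem.Str.endswith e "_B02.tif" then acc ++ [e] else acc) s1
  let s3 := list_temp.foldl (fun acc e => if PySem.Str.endswith e "_B03.tif" then acc ++ [e] else acc) s2
  let s4 := list_temp.foldl (fun acc e => if PySem.Str.endswith e "_B04.tif" then acc ++ [e] else acc) s3
  let s5 := list_temp.foldl (fun acc e => if PySem.Str.endswith e "_B05.tif" then acc ++ [e] else acc) s4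
  let s6 := list_temp.foldl (fun acc e => if PySem.Str.endswith e "_B06.tif" then acc ++ [e] else acc) s5
  let s7 := list_temp.foldl (fun acc e => if PySem.Str.endswith e "_B07.tif" then acc ++ [e] else acc) s6
  let s8 := list_temp.foldl (fun acc e => if PySem.Str.endswith e "_B08.tif" then acc ++ [e] else acc) s7
  let s9 := list_temp.foldl (fun acc e => if PySem.Str.endswith e "_B09.tif" then acc ++ [e] else acc) s8
  let s10 := list_temp.foldl (fun acc e => if PySem.Str.endswith e "_B10.tif" then acc ++ [e] else acc) s9
  let s11 := list_temp.foldl (fun acc e => if PySem.Str.endswith e "_B11.tif" then acc ++ [e] else acc) s10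
  let s12 := list_temp.foldl (fun acc e => if PySem.Str.endswith e "_B12.tif" then acc ++ [e] else acc) s11
  list_temp.foldl (fun acc e => if PySem.Str.endswith e "_B8A.tif" then acc ++ [e] else acc) s12

-- ===== PORT B =====
-- the module-level _BANDS list of Source B
def pvBands : List String :=
  ["_B01.tif", "_B02.tif", "_B03.tif", "_B04.tif", "_B05.tif",
   "_B06.tif", "_B07.tif", "_B08.tif", "_B09.tif", "_B10.tif",
   "_B11.tif", "_B12.tif", "_B8A.tif"]

-- literal transliteration of Source B: one grouping pass
-- (buckets.setdefault(k, []).append(e)  =  buckets[k] = buckets.get(k, []) + [e]  =  Dict.modify),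
-- then out += buckets.get(band, []) over _BANDS
def band_sorter_S2_alt (list_temp : List String) : List String :=
  let buckets := list_temp.foldl
    (fun d e => d.modify (PySem.Str.slice e (some (-8)) none) [] (fun l => l ++ [e]))
    (PySem.Dict.empty)
  pvBands.foldl (fun out band => out ++ buckets.getD band []) []

-- ===== PRECONDITION & SPEC =====
def Spec_band_sorter_S2 (list_temp : List String) (out : List String) : Prop := out = band_sorter_S2_alt list_temp
instance (list_temp : List String) (out : List String) : Decidable (Spec_band_sorter_S2 list_temp out) := by unfold Spec_band_sorter_S2; infer_instance

-- ===== CLAIM (what is proved, stated in full; the proofs are below) =====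
def Claim_equal_band_sorter_S2 : Prop := ∀ (list_temp : List String), Dom_band_sorter_S2 list_temp → Spec_band_sorter_S2 list_temp (band_sorter_S2 list_temp)

-- ===== LEMMAS AND PROOFS =====

-- e.endswith(s) for an 8-character s is exactly "the last-8-character slice of e equals s"
theorem endswith_eq_slice_beq (e s : String) (hs : s.toList.length = 8) :
    PySem.Str.endswith e s = ((PySem.Str.slice e (some (-8)) none) == s) := by
  have h1 : (PySem.Str.slice e (some (-8)) none).toList = e.toList.drop (e.toList.length - 8) := by
    simp [pysem]
  rw [Bool.eq_iff_iff, beq_iff_eq]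
  rw [show PySem.Str.endswith e s = PySem.Chars.endswith e.toList s.toList from by simp [pysem]]
  rw [PySem.Chars.endswith_iff, List.suffix_iff_eq_drop, String.ext_iff, h1, hs]
  exact eq_comm

-- each bucket of B's grouping pass is the filter of the input by its key
theorem bucket_getD (xs : List String) (s : String) :
    ((xs.foldl
        (fun d e => d.modify (PySem.Str.slice e (some (-8)) none) [] (fun l => l ++ [e]))
        (PySem.Dict.empty : PySem.Dict String (List String))).getD s [])
      = xs.filter (fun e => PySem.Str.slice e (some (-8)) none == s) := by
  have hmap : xs.foldl
        (fun d e => d.modify (PySem.Str.slice e (some (-8)) none) [] (fun l => l ++ [e]))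
        (PySem.Dict.empty : PySem.Dict String (List String))
      = (xs.map (fun e => (PySem.Str.slice e (some (-8)) none, e))).foldl
        (fun d p => d.modify p.1 [] (fun l => l ++ [p.2])) PySem.Dict.empty := by
    rw [List.foldl_map]
  rw [hmap, PySem.Dict.getD_foldl_modify_append]
  simp [List.filter_map, Function.comp_def]

theorem bucket_getD' (xs : List String) (s : String) (hs : s.toList.length = 8) :
    ((xs.foldl
        (fun d e => d.modify (PySem.Str.slice e (some (-8)) none) [] (fun l => l ++ [e]))
        (PySem.Dict.empty : PySem.Dict String (List String))).getD s [])
      = xs.filter (fun e => PySem.Str.endswith e s) := by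
  rw [bucket_getD xs s]
  exact List.filter_congr (fun e _ => (endswith_eq_slice_beq e s hs).symm)

-- ===== VERDICT (by name: the statement is the Claim_ definition above) =====
theorem band_sorter_S2_spec : Claim_equal_band_sorter_S2 := by
  intro xs _
  unfold Spec_band_sorter_S2 band_sorter_S2 band_sorter_S2_alt
  simp only [PySem.List.foldl_append_if_eq_filter, pvBands, List.foldl]
  rw [bucket_getD' xs "_B01.tif" (by decide), bucket_getD' xs "_B02.tif" (by decide),
    bucket_getD' xs "_B03.tif" (by decide), bucket_getD' xs "_B04.tif" (by decide),
    bucket_getD' xs "_B05.tif" (by decide), bucket_getD' xs "_B06.tif" (by decide),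
    bucket_getD' xs "_B07.tif" (by decide), bucket_getD' xs "_B08.tif" (by decide),
    bucket_getD' xs "_B09.tif" (by decide), bucket_getD' xs "_B10.tif" (by decide),
    bucket_getD' xs "_B11.tif" (by decide), bucket_getD' xs "_B12.tif" (by decide),
    bucket_getD' xs "_B8A.tif" (by decide)]
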